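-- pv_equiv track=rewrite | github.com/a-brandon/practice | edabit/making_a_box_20.py | char_box
-- ===== SOURCE A (Python) =====
-- def char_box(size):
--     if size == 0:
--         return [[]]
--     elif not isinstance(size, int) or size < 0:
--         return - 1
--
--     matrix = []
--     for i in range(size):
--         if i == 0 or i == size - 1:
--             matrix.append(list('#' * size))
--         else:
--             matrix.append(list('#' + (' ' * (size - 2)) + '#'))
--     return matrix
-- ===== SOURCE B (Python) =====
-- def char_box(size):
--     if size == 0:
--         return [[]]
--     elif not isinstance(size, int) or size < 0:
--         return -1
--     return [['#' if i == 0 or i == size - 1 or j == 0 or j == size - 1 else ' '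
--              for j in range(size)]
--             for i in range(size)]
-- ===== Notes on version B (the rewrite author's own statement) =====
-- stated objective: idiomatic
-- what changed: Replaces the per-row string-multiplication/concatenation builds appended in a loop with a single cell-by-cell nested comprehension placing '#' exactly on border coordinates.
-- outside the precondition, e.g. on char_box(-1): A returns -1, B returns -1
import Mathlib
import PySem

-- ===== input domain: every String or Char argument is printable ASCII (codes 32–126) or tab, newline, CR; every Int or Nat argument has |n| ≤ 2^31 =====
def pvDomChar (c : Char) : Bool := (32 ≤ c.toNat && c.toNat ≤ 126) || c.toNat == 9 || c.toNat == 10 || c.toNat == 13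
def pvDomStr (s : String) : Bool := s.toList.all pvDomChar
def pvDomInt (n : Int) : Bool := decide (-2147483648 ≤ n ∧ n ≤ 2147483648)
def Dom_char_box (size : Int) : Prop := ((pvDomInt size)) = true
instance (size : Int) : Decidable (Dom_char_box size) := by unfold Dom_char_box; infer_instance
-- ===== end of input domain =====

-- B builds the box cell-by-cell with a nested comprehension over (i, j) instead of
-- appending rows made by string multiplication; return value only, no mutation.

-- ===== PORT A =====
def char_box (size : Int) : List (List String) :=
  if size = 0 then [[]]
  else if size < 0 then []   -- Python A returns -1 here (not a list); excluded by Pre_char_box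
  else
    (PySem.List.pyRange 0 size 1).foldl
      (fun matrix i =>
        if i = 0 ∨ i = size - 1 then
          matrix ++ [List.replicate size.toNat "#"]            -- list('#' * size)
        else
          matrix ++ ["#" :: List.replicate (size - 2).toNat " " ++ ["#"]])  -- list('#' + ' '*(size-2) + '#')
      []

-- ===== PORT B =====
def char_box_alt (size : Int) : List (List String) :=
  if size = 0 then [[]]
  else if size < 0 then []   -- Python B returns -1 here (not a list); excluded by Pre_char_box
  else
    (PySem.List.pyRange 0 size 1).map (fun i =>
      (PySem.List.pyRange 0 size 1).map (fun j =>
        if i = 0 ∨ i = size - 1 ∨ j = 0 ∨ j = size - 1 then "#" else " "))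

-- ===== PRECONDITION & SPEC =====
-- Pre_ excludes negative sizes, on which Python returns -1, an int and not a list of lists
-- (it leaves the declared return type List (List String)).
def Pre_char_box (size : Int) : Prop := 0 ≤ size
instance (size : Int) : Decidable (Pre_char_box size) := by unfold Pre_char_box; infer_instance
def pvWitness_char_box : Int := (3)

def Spec_char_box (size : Int) (out : List (List String)) : Prop := out = char_box_alt size
instance (size : Int) (out : List (List String)) : Decidable (Spec_char_box size out) := by unfold Spec_char_box; infer_instance

-- ===== CLAIM (what is proved, stated in full; the proofs are below) =====
def Claim_equal_char_box : Prop := ∀ (size : Int), Dom_char_box size → Pre_char_box size → Spec_char_box size (char_box size)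

-- ===== LEMMAS AND PROOFS =====

-- one row of B equals the row A appends, for every loop index i of the range
theorem char_box_row_eq (m i : Int) (h0 : 0 ≤ i) (hi : i < m + 1) :
    (PySem.List.pyRange 0 (m + 1) 1).map (fun j =>
        if i = 0 ∨ i = m ∨ j = 0 ∨ j = m then "#" else " ")
      = if i = 0 ∨ i = m then List.replicate (m + 1).toNat "#"
        else "#" :: List.replicate (m - 1).toNat " " ++ ["#"] := by
  by_cases hb : i = 0 ∨ i = m
  · rw [if_pos hb,
        List.map_congr_left (g := fun _ => "#") (fun j _ => if_pos (by tauto)),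
        List.map_const', PySem.List.length_pyRange_one]
    norm_num
  · have h1 : i ≠ 0 := fun h => hb (Or.inl h)
    have h2 : i ≠ m := fun h => hb (Or.inr h)
    rw [if_neg hb, PySem.List.pyRange_one_cons (by omega),
        PySem.List.pyRange_one_succ_right (by omega)]
    simp only [List.map_cons, List.map_append, List.map_nil]
    simp only [true_or, or_true, if_true]
    rw [List.map_congr_left (g := fun _ => " ")
          (fun j hj => if_neg (by rw [PySem.List.mem_pyRange_one] at hj; omega)),
        List.map_const', PySem.List.length_pyRange_one]
    norm_num

theorem char_box_eq (size : Int) (hpos : 0 < size) : char_box size = char_box_alt size := by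
  obtain ⟨m, rfl⟩ : ∃ m, size = m + 1 := ⟨size - 1, by ring⟩
  unfold char_box char_box_alt
  rw [if_neg (by omega), if_neg (by omega), if_neg (by omega), if_neg (by omega)]
  have hfold :
      (fun (matrix : List (List String)) (i : Int) =>
        if i = 0 ∨ i = m + 1 - 1 then
          matrix ++ [List.replicate (m + 1).toNat "#"]
        else
          matrix ++ ["#" :: List.replicate (m + 1 - 2).toNat " " ++ ["#"]])
      = (fun (matrix : List (List String)) (i : Int) =>
          matrix ++ [if i = 0 ∨ i = m then List.replicate (m + 1).toNat "#"
                     else "#" :: List.replicate (m - 1).toNat " " ++ ["#"]]) := by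
    funext mat i
    simp only [show m + 1 - 1 = m from by ring, show m + 1 - 2 = m - 1 from by ring]
    split <;> rfl
  rw [hfold, PySem.List.foldl_append_singleton_eq_map, List.nil_append]
  simp only [show m + 1 - 1 = m from by ring]
  apply List.map_congr_left
  intro i hi
  rw [PySem.List.mem_pyRange_one] at hi
  exact (char_box_row_eq m i hi.1 hi.2).symm

-- ===== VERDICT (by name: the statement is the Claim_ definition above) =====
theorem char_box_spec : Claim_equal_char_box := by
  intro size _ hpre
  unfold Spec_char_box
  by_cases h0 : size = 0
  · subst h0; rfl
  · exact char_box_eq size (by unfold Pre_char_box at hpre; omega)
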